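-- pv_equiv track=rewrite | github.com/itsJonnie/surf-forecast-ai-analyzer | app/surf_logic.py | _pick_hour_for_date
-- ===== SOURCE A (Python) =====
-- def _pick_hour_for_date(hours: list[dict], date: str) -> dict | None:
--     """Select a representative hour for the given YYYY-MM-DD date.
--
--     Prefers 12:00Z if available; otherwise returns the first hour matching
--     the date; returns None if no hour matches.
--     """
--     target_prefix = f"{date}T"
--     noon_idx = None
--     first_idx = None
--     for i, h in enumerate(hours):
--         t = h.get("time", "")
--         if not t.startswith(target_prefix):
--             continue
--         if first_idx is None:
--             first_idx = i
--         # look for 12:00 specifically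
--         if t.startswith(f"{date}T12:00"):
--             noon_idx = i
--             break
--     idx = noon_idx if noon_idx is not None else first_idx
--     return hours[idx] if idx is not None else None
-- ===== SOURCE B (Python) =====
-- def _pick_hour_for_date(hours: list[dict], date: str) -> dict | None:
--     """Filter-then-select: first collect the hours matching the date, then
--     return the noon hour among them if present, else the first match, else None."""
--     matching = [h for h in hours if h.get("time", "").startswith(f"{date}T")]
--     return next((h for h in matching if h.get("time", "").startswith(f"{date}T12:00")),
--                 matching[0] if matching else None)
-- ===== Notes on version B (the rewrite author's own statement) =====
-- stated objective: simpler
-- what changed: Replaced A's single enumerate pass tracking noon_idx/first_idx with a filter of the date-matching hours followed by a noon-or-first selection over that filtered list.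
import Mathlib
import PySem

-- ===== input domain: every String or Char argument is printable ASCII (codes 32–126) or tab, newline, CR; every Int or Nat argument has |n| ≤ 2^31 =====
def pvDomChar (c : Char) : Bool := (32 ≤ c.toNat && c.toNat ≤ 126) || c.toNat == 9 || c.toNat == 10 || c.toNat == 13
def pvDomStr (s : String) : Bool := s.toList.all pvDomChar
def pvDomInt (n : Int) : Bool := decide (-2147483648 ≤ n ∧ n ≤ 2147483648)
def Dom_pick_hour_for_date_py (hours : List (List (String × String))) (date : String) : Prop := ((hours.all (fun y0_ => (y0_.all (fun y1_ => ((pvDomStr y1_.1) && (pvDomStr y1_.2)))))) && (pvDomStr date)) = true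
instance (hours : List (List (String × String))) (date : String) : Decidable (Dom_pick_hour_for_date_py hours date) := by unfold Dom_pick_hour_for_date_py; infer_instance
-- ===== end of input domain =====

-- B replaces A's single pass with two index trackers by a filter of date-matching hours followed by a noon-or-first selection (simpler decomposition).


-- ===== PORT A =====
-- A's loop over enumerate(hours): tracks the first matching hour and breaks at a noon hour.
-- (We carry the matched hours themselves instead of their indices; 'hours[idx]' at the end is exactly the carried element.)
def pickHourLoopA (date : String) (first : Option (List (String × String))) :
    List (List (String × String)) → Option (List (String × String)) × Option (List (String × String))
  | [] => (none, first)
  | h :: rest =>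
    let t := PySem.Dict.getD (PySem.Dict.mk h) "time" ""
    if ¬ PySem.Str.startswith t (date ++ "T") then
      pickHourLoopA date first rest
    else
      let first' := match first with | none => some h | some f => some f
      if PySem.Str.startswith t (date ++ "T12:00") then (some h, first')
      else pickHourLoopA date first' rest

def pick_hour_for_date_py (hours : List (List (String × String))) (date : String) : Option (List (String × String)) :=
  match pickHourLoopA date none hours with
  | (some h, _) => some h
  | (none, first) => first

-- ===== PORT B =====
def pick_hour_for_date_py_alt (hours : List (List (String × String))) (date : String) : Option (List (String × String)) :=
  let matching := hours.filter (fun h => PySem.Str.startswith (PySem.Dict.getD (PySem.Dict.mk h) "time" "") (date ++ "T"))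
  match matching.find? (fun h => PySem.Str.startswith (PySem.Dict.getD (PySem.Dict.mk h) "time" "") (date ++ "T12:00")) with
  | some h => some h
  | none => matching.head?

-- ===== PRECONDITION & SPEC =====
def Spec_pick_hour_for_date_py (hours : List (List (String × String))) (date : String) (out : Option (List (String × String))) : Prop := out = pick_hour_for_date_py_alt hours date
instance (hours : List (List (String × String))) (date : String) (out : Option (List (String × String))) : Decidable (Spec_pick_hour_for_date_py hours date out) := by unfold Spec_pick_hour_for_date_py; infer_instance

-- ===== CLAIM (what is proved, stated in full; the proofs are below) =====
def Claim_equal_pick_hour_for_date_py : Prop := ∀ (hours : List (List (String × String))) (date : String), Dom_pick_hour_for_date_py hours date → Spec_pick_hour_for_date_py hours date (pick_hour_for_date_py hours date)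

-- ===== LEMMAS AND PROOFS =====

-- a noon match is in particular a date match
theorem noon_implies_date (t date : String)
    (h : PySem.Str.startswith t (date ++ "T12:00") = true) :
    PySem.Str.startswith t (date ++ "T") = true := by
  simp only [PySem.Str.startswith_eq] at h ⊢
  rw [PySem.Chars.startswith_iff] at h ⊢
  refine List.IsPrefix.trans ⟨("12:00" : String).toList, ?_⟩ h
  simp

-- loop invariant: A's loop with accumulator 'first' computes noon-or-(first-or-head of matching)
theorem loopA_invariant (date : String) (hours : List (List (String × String)))
    (first : Option (List (String × String))) :
    (match pickHourLoopA date first hours with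
     | (some h, _) => some h
     | (none, f) => f) =
    (match (hours.filter (fun h => PySem.Str.startswith (PySem.Dict.getD (PySem.Dict.mk h) "time" "") (date ++ "T"))).find?
        (fun h => PySem.Str.startswith (PySem.Dict.getD (PySem.Dict.mk h) "time" "") (date ++ "T12:00")) with
     | some h => some h
     | none =>
       match first with
       | some f => some f
       | none => (hours.filter (fun h => PySem.Str.startswith (PySem.Dict.getD (PySem.Dict.mk h) "time" "") (date ++ "T"))).head?) := by
  induction hours generalizing first with
  | nil => cases first <;> simp [pickHourLoopA]
  | cons h rest ih =>
    by_cases hp : PySem.Str.startswith (PySem.Dict.getD (PySem.Dict.mk h) "time" "") (date ++ "T") = true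
    · by_cases hn : PySem.Str.startswith (PySem.Dict.getD (PySem.Dict.mk h) "time" "") (date ++ "T12:00") = true
      · cases first <;> simp_all [pickHourLoopA]
      · cases first <;> simp_all [pickHourLoopA]
    · have hn : PySem.Str.startswith (PySem.Dict.getD (PySem.Dict.mk h) "time" "") (date ++ "T12:00") = false := by
        by_contra hc
        exact hp (noon_implies_date _ _ (by revert hc; cases PySem.Str.startswith (PySem.Dict.getD (PySem.Dict.mk h) "time" "") (date ++ "T12:00") <;> simp))
      cases first <;> simp_all [pickHourLoopA]

-- ===== VERDICT (by name: the statement is the Claim_ definition above) =====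
theorem pick_hour_for_date_py_spec : Claim_equal_pick_hour_for_date_py := by
  intro hours date _
  unfold Spec_pick_hour_for_date_py pick_hour_for_date_py pick_hour_for_date_py_alt
  simpa using loopA_invariant date hours none
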